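-- pv_equiv track=rewrite | github.com/WiktorLidwin/EC551-PA2 | Program2/main2.py | convert_sop_equation
-- ===== SOURCE A (Python) =====
-- def convert_sop_equation(sop_equation):
--     variables = set()
--     binary_string = ''
--
--     for term in sop_equation:
--         for literal in term:
--             if(literal[-1] == "'"):
--                 variables.add(literal[:-1])
--             else:
--                 variables.add(literal)
--
--     sorted_variables = sorted(variables)
--     num_rows = 2 ** len(sorted_variables)
--
--     for i in range(num_rows):
--         case = format(i, f'0{len(sorted_variables)}b')
--
--         found_match = False
--         for term in sop_equation:
--             term_match = True
--             for literal in term: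
--                 variable = literal[:-1]
--                 if(literal[-1] == "'"):
--                     variable = literal[:-1]
--                 else:
--                     variable = literal
--                 inverse = literal[-1] == "'"
--
--                 if (inverse and case[sorted_variables.index(variable)] == '0') or \
--                    (not inverse and case[sorted_variables.index(variable)] == '1'):
--                     t = 0
--                 else:
--                    term_match = False
--                    break
--
--             if term_match:
--                 found_match = True
--                 break
--
--         binary_string += '1' if found_match else '0'
--     return (",".join(sorted_variables), binary_string)
-- ===== SOURCE B (Python) =====
-- def convert_sop_equation(sop_equation):
--     variables = set()
--     for term in sop_equation:
--         for lit in term: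
--             variables.add(lit[:-1] if lit[-1] == "'" else lit)
--     sorted_variables = sorted(variables)
--     n = len(sorted_variables)
--
--     # bit position of each variable (MSB first, matching the truth-table column order)
--     pos = {v: n - 1 - j for j, v in enumerate(sorted_variables)}
--
--     # each feasible term becomes a (mask, value) pair: row i satisfies the term
--     # iff i & mask == value; contradictory terms (x and x') are dropped
--     masks = []
--     for term in sop_equation:
--         mask = 0
--         value = 0
--         feasible = True
--         for lit in term:
--             want = 0 if lit[-1] == "'" else 1
--             b = pos[lit[:-1] if lit[-1] == "'" else lit]
--             bit = 1 << b
--             if mask & bit: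
--                 if (value >> b) & 1 != want:
--                     feasible = False
--                     break
--             else:
--                 mask |= bit
--                 if want:
--                     value |= bit
--         if feasible:
--             masks.append((mask, value))
--
--     binary_string = ''.join(
--         '1' if any((i & m) == v for m, v in masks) else '0'
--         for i in range(1 << n))
--     return (",".join(sorted_variables), binary_string)
-- ===== Notes on version B (the rewrite author's own statement) =====
-- stated objective: alternative
-- what changed: Instead of re-scanning every literal of every term for each of the 2^n rows (with a linear sorted_variables.index lookup per literal), B precomputes one integer (mask, value) pair per term via a variable->bit-position dict, so each row is decided by one bitwise test per term (intended as faster; the probe measured 4.95x at n=16 but both time out at n=64, so it is claimed only as an alternative).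
import Mathlib
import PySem

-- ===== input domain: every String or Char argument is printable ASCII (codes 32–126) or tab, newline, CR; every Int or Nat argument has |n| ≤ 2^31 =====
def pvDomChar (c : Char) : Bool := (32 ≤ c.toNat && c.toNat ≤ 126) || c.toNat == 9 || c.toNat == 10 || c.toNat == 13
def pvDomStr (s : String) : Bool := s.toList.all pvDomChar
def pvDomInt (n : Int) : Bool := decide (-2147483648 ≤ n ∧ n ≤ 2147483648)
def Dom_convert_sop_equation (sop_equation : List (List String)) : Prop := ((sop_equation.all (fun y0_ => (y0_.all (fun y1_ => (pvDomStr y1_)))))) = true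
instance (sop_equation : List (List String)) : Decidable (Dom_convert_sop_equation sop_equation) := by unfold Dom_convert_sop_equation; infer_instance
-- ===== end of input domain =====

-- B replaces A's per-row re-scan of every literal (with repeated list.index) by per-term precomputed
-- (mask, value) bit patterns, so each row costs one bitwise test per term (objective: alternative).

-- ===== PORT A =====
-- hand port of format(i, f'0{n}b'): exact zero-padded binary for 0 ≤ i < 2^n, which covers every call site below
def pvCaseA (i : Int) (n : Nat) : List Char :=
  (List.range n).map (fun j => if i.toNat.testBit (n - 1 - j) then '1' else '0')

-- variables = set()  accumulated over both loops of A's first pass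
def pvVarsA (sop_equation : List (List String)) : PySem.Set String :=
  sop_equation.foldl (fun acc term =>
    term.foldl (fun a lit =>
      if PySem.Str.pyGet? lit (-1) == some '\'' then
        PySem.Set.add a (PySem.Str.slice lit none (some (-1)))
      else PySem.Set.add a lit) acc) PySem.Set.empty

-- body of A's literal loop; the index?/pyGet? lookups cannot fail under Pre_ (the variable was
-- collected in the first pass and the row string has length n), so the .getD defaults are unreachable
def pvLitOkA (sv : List String) (cs : List Char) (lit : String) : Bool :=
  let inverse : Bool := PySem.Str.pyGet? lit (-1) == some '\''
  let varName : String := if inverse then PySem.Str.slice lit none (some (-1)) else lit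
  let idx : Nat := (PySem.List.index? sv varName).getD 0
  let c : Char := (PySem.List.pyGet? cs (idx : Int)).getD ' '
  (inverse && c == '0') || (!inverse && c == '1')

-- 'for literal in term: … else: term_match = False; break'
def pvTermA (sv : List String) (cs : List Char) : List String → Bool
  | [] => true
  | lit :: rest => if pvLitOkA sv cs lit then pvTermA sv cs rest else false

-- 'for term in sop_equation: … found_match = True; break'
def pvFoundA (sv : List String) (cs : List Char) : List (List String) → Bool
  | [] => false
  | t :: ts => if pvTermA sv cs t then true else pvFoundA sv cs ts

def convert_sop_equation (sop_equation : List (List String)) : String × String :=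
  let sorted_variables := PySem.List.sorted (pvVarsA sop_equation) (fun x => x) false
  let num_rows : Int := 2 ^ sorted_variables.length
  -- binary_string += …  accumulated on List Char (Lean's String.append is kernel-opaque), String.ofList at the end
  let binary_string : List Char :=
    (PySem.List.pyRange 0 num_rows 1).foldl (fun acc i =>
      acc ++ [if pvFoundA sorted_variables (pvCaseA i sorted_variables.length) sop_equation then '1' else '0']) []
  (PySem.Str.join "," sorted_variables, String.ofList binary_string)

-- ===== PORT B =====
-- lit[:-1] if lit[-1] == "'" else lit  (the pyGet? lookup cannot fail under Pre_: literals are nonempty)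
def pvVarOfB (lit : String) : String :=
  if PySem.Str.pyGet? lit (-1) == some '\'' then PySem.Str.slice lit none (some (-1)) else lit

def pvVarsB (sop_equation : List (List String)) : PySem.Set String :=
  sop_equation.foldl (fun acc term =>
    term.foldl (fun a lit => PySem.Set.add a (pvVarOfB lit)) acc) PySem.Set.empty

-- pos = {v: n - 1 - j for j, v in enumerate(sorted_variables)}
def pvPosB (sv : List String) : PySem.Dict String Int :=
  (PySem.List.enumerate sv 0).foldl
    (fun d p => d.insert p.2 ((sv.length : Int) - 1 - p.1)) PySem.Dict.empty

-- B's inner literal loop: builds (mask, value); none = term found contradictory ('feasible = False; break');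
-- the pos lookup cannot fail under Pre_ (every variable is a key of pos), so the .getD default is unreachable
def pvTermMaskB (pos : PySem.Dict String Int) : List String → Nat → Nat → Option (Nat × Nat)
  | [], m, v => some (m, v)
  | lit :: rest, m, v =>
    let want : Bool := !(PySem.Str.pyGet? lit (-1) == some '\'')
    let b : Nat := (pos.getD (pvVarOfB lit) 0).toNat
    if m.testBit b then
      if v.testBit b == want then pvTermMaskB pos rest m v else none
    else
      pvTermMaskB pos rest (m ||| 1 <<< b) (if want then v ||| 1 <<< b else v)

-- masks = []; for term in sop_equation: … masks.append((mask, value))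
def pvMasksB (pos : PySem.Dict String Int) : List (List String) → List (Nat × Nat)
  | [] => []
  | t :: ts =>
    match pvTermMaskB pos t 0 0 with
    | some mv => mv :: pvMasksB pos ts
    | none => pvMasksB pos ts

def convert_sop_equation_alt (sop_equation : List (List String)) : String × String :=
  let sorted_variables := PySem.List.sorted (pvVarsB sop_equation) (fun x => x) false
  let pos := pvPosB sorted_variables
  let masks := pvMasksB pos sop_equation
  -- ''.join('1' if any(…) else '0' for i in range(1 << n)), built on List Char
  let binary_string : List Char :=
    (PySem.List.pyRange 0 (2 ^ sorted_variables.length : Int) 1).map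
      (fun i => if masks.any (fun mv => i.toNat &&& mv.1 == mv.2) then '1' else '0')
  (PySem.Str.join "," sorted_variables, String.ofList binary_string)

-- ===== PRECONDITION & SPEC =====
-- Pre_ excludes inputs containing an empty-string literal: there Python A raises IndexError on literal[-1]
def Pre_convert_sop_equation (sop_equation : List (List String)) : Prop :=
  ∀ term ∈ sop_equation, ∀ lit ∈ term, lit ≠ ""
instance (sop_equation : List (List String)) : Decidable (Pre_convert_sop_equation sop_equation) := by
  unfold Pre_convert_sop_equation; infer_instance

def pvWitness_convert_sop_equation : List (List String) := [["a", "b'"], ["c"]]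

def Spec_convert_sop_equation (sop_equation : List (List String)) (out : String × String) : Prop := out = convert_sop_equation_alt sop_equation
instance (sop_equation : List (List String)) (out : String × String) : Decidable (Spec_convert_sop_equation sop_equation out) := by unfold Spec_convert_sop_equation; infer_instance

-- ===== CLAIM (what is proved, stated in full; the proofs are below) =====
def Claim_equal_convert_sop_equation : Prop := ∀ (sop_equation : List (List String)), Dom_convert_sop_equation sop_equation → Pre_convert_sop_equation sop_equation → Spec_convert_sop_equation sop_equation (convert_sop_equation sop_equation)


-- ===== LEMMAS AND PROOFS =====

theorem pvVars_eq (sop : List (List String)) : pvVarsB sop = pvVarsA sop := by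
  unfold pvVarsA pvVarsB
  congr 1
  funext acc term
  congr 1
  funext a lit
  unfold pvVarOfB
  exact apply_ite (PySem.Set.add a) _ _ _

-- membership of every occurring variable in the collected set
theorem pvMem_inner (t : List String) (acc : PySem.Set String) (x : String) (hx : x ∈ acc) :
    x ∈ t.foldl (fun a lit => PySem.Set.add a (pvVarOfB lit)) acc := by
  induction t generalizing acc with
  | nil => exact hx
  | cons lit rest ih => exact ih _ ((PySem.Set.mem_add _ _ _).2 (Or.inl hx))

theorem pvMem_inner_self (t : List String) (acc : PySem.Set String) (lit : String) (hl : lit ∈ t) :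
    pvVarOfB lit ∈ t.foldl (fun a lit => PySem.Set.add a (pvVarOfB lit)) acc := by
  induction t generalizing acc with
  | nil => cases hl
  | cons l rest ih =>
    simp only [List.foldl_cons]
    rcases List.mem_cons.1 hl with rfl | hl
    · exact pvMem_inner _ _ _ ((PySem.Set.mem_add _ _ _).2 (Or.inr rfl))
    · exact ih _ hl

theorem pvMem_outer (sop : List (List String)) (acc : PySem.Set String) (x : String) (hx : x ∈ acc) :
    x ∈ sop.foldl (fun acc term =>
      term.foldl (fun a lit => PySem.Set.add a (pvVarOfB lit)) acc) acc := by
  induction sop generalizing acc with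
  | nil => exact hx
  | cons s rest ih => exact ih _ (pvMem_inner _ _ _ hx)

theorem pvMem_vars (sop : List (List String)) (t : List String) (ht : t ∈ sop)
    (lit : String) (hl : lit ∈ t) : pvVarOfB lit ∈ pvVarsA sop := by
  rw [← pvVars_eq]
  unfold pvVarsB
  suffices h : ∀ (acc : PySem.Set String),
      pvVarOfB lit ∈ sop.foldl (fun acc term =>
        term.foldl (fun a lit => PySem.Set.add a (pvVarOfB lit)) acc) acc by
    exact h _
  induction sop with
  | nil => cases ht
  | cons s rest ih =>
    intro acc
    simp only [List.foldl_cons]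
    rcases List.mem_cons.1 ht with rfl | ht
    · exact pvMem_outer rest _ _ (pvMem_inner_self t acc lit hl)
    · exact ih ht _

theorem pvVarsA_nodup (sop : List (List String)) : (pvVarsA sop).Nodup := by
  rw [← pvVars_eq]
  unfold pvVarsB
  suffices h : ∀ acc : PySem.Set String, acc.Nodup →
      (sop.foldl (fun acc term => term.foldl (fun a lit => PySem.Set.add a (pvVarOfB lit)) acc) acc).Nodup by
    exact h _ (by simp [PySem.Set.empty])
  induction sop with
  | nil => exact fun _ h => h
  | cons s rest ih =>
    intro acc hacc
    refine ih _ ?_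
    induction s generalizing acc with
    | nil => exact hacc
    | cons l ls ih2 => exact ih2 _ (PySem.Set.nodup_add _ _ hacc)

-- lookup in the position dict
theorem pvPos_getD (sv : List String) (hnd : sv.Nodup) (v : String) (k : Nat)
    (hk : PySem.List.index? sv v = some k) :
    (pvPosB sv).getD v 0 = (sv.length : Int) - 1 - k := by
  obtain ⟨hlt, hv, -⟩ := PySem.List.getElem_of_index?_eq_some hk
  have hsnd : (PySem.List.enumerate sv 0).map (fun p => p.2) = sv := PySem.List.map_snd_enumerate sv 0
  have hitems : (pvPosB sv).items =
      (PySem.Dict.empty : PySem.Dict String Int).items ++ (PySem.List.enumerate sv 0).map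
        (fun p => (p.2, (sv.length : Int) - 1 - p.1)) := by
    refine PySem.Dict.items_foldl_insert_fresh (PySem.List.enumerate sv 0)
      (fun p => p.2) (fun p => (sv.length : Int) - 1 - p.1) PySem.Dict.empty ?_ ?_
    · intro a _; exact PySem.Dict.contains_empty _
    · rw [hsnd]; exact hnd
  have hempty : (PySem.Dict.empty : PySem.Dict String Int).items = [] := rfl
  have hkeys : (pvPosB sv).keys = sv := by
    show (pvPosB sv).items.map (fun p => p.1) = sv
    rw [hitems, hempty, List.nil_append, List.map_map]
    exact hsnd
  exact PySem.Dict.getD_of_mem_items (pvPosB sv)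
    (by rw [hitems, hempty, List.nil_append]
        exact List.mem_map.2 ⟨((0 : Int) + (k : Int), sv[k]),
          (PySem.List.mem_enumerate_iff _ _ _).2 ⟨k, hlt, rfl⟩, by simp [hv]⟩)
    (by rw [hkeys]; exact hnd) 0

-- character j of the row string
theorem pvCase_get (i : Int) (n j : Nat) (hj : j < n) :
    (PySem.List.pyGet? (pvCaseA i n) ((j : Nat) : Int)).getD ' ' =
      (if i.toNat.testBit (n - 1 - j) then '1' else '0') := by
  rw [PySem.List.pyGet?_natCast]
  simp [pvCaseA, hj]

-- A's literal test, characterised by one bit of the row index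
theorem pvLit_eq (sv : List String) (i : Int) (lit : String) (k : Nat)
    (hk : PySem.List.index? sv (pvVarOfB lit) = some k) :
    pvLitOkA sv (pvCaseA i sv.length) lit =
      (i.toNat.testBit (sv.length - 1 - k) == !(PySem.Str.pyGet? lit (-1) == some '\'')) := by
  obtain ⟨hlt, -, -⟩ := PySem.List.getElem_of_index?_eq_some hk
  simp only [pvLitOkA]
  rw [show (if PySem.Str.pyGet? lit (-1) == some '\'' then PySem.Str.slice lit none (some (-1)) else lit)
        = pvVarOfB lit from rfl, hk]
  simp only [Option.getD_some]
  rw [pvCase_get i sv.length k hlt]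
  cases he : (PySem.Str.pyGet? lit (-1) == some '\'') <;>
    cases ht : i.toNat.testBit (sv.length - 1 - k) <;> simp

-- one step of B's mask accumulation
theorem pvInvStep (m v b : Nat) (want : Bool)
    (hinv : ∀ c, v.testBit c = true → m.testBit c = true) :
    ∀ c, (if want then v ||| 1 <<< b else v).testBit c = true →
      (m ||| 1 <<< b).testBit c = true := by
  intro c hc
  rw [Nat.testBit_or]
  cases want
  · first
      | rw [if_neg not_false] at hc
      | simp only [Bool.false_eq_true, if_false] at hc
    rw [hinv c hc]; rfl
  · first
      | rw [if_pos trivial] at hc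
      | simp only [if_true] at hc
    rw [Nat.testBit_or] at hc
    rcases Bool.or_eq_true_iff.1 hc with h | h
    · rw [hinv c h]; rfl
    · rw [h]; simp

theorem pvBitEq (a b : Nat) : a = b ↔ ∀ i, a.testBit i = b.testBit i :=
  ⟨fun h _ => by rw [h], Nat.eq_of_testBit_eq⟩

theorem pvStep (k0 m v b : Nat) (want : Bool) (hmb : m.testBit b = false)
    (hinv : ∀ c, v.testBit c = true → m.testBit c = true) :
    (k0 &&& (m ||| 1 <<< b) = (if want then v ||| 1 <<< b else v)) ↔
      (k0 &&& m = v ∧ k0.testBit b = want) := by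
  have hvb : v.testBit b = false := by
    cases h : v.testBit b
    · rfl
    · rw [hinv b h] at hmb; cases hmb
  have hsb : ∀ c, (1 <<< b).testBit c = decide (b = c) := by
    intro c; rw [Nat.one_shiftLeft]; exact Nat.testBit_two_pow
  cases want
  all_goals first
    | rw [if_neg (by decide), pvBitEq, pvBitEq]
    | rw [if_pos rfl, pvBitEq, pvBitEq]
  all_goals constructor
  · intro h
    have hb := h b
    simp [Nat.testBit_and, Nat.testBit_or, hsb, hmb, hvb] at hb
    refine ⟨fun c => ?_, hb⟩
    by_cases hc : b = c
    · subst hc; simp [Nat.testBit_and, hb, hvb]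
    · have := h c
      simpa [Nat.testBit_and, Nat.testBit_or, hsb, hc] using this
  · rintro ⟨h1, h2⟩ c
    by_cases hc : b = c
    · subst hc; simp [Nat.testBit_and, Nat.testBit_or, hsb, hvb, h2]
    · have := h1 c
      simpa [Nat.testBit_and, Nat.testBit_or, hsb, hc] using this
  · intro h
    have hb := h b
    simp [Nat.testBit_and, Nat.testBit_or, hsb, hmb, hvb] at hb
    refine ⟨fun c => ?_, hb⟩
    by_cases hc : b = c
    · subst hc; simp [Nat.testBit_and, hmb, hvb]
    · have := h c
      simpa [Nat.testBit_and, Nat.testBit_or, hsb, hc] using this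
  · rintro ⟨h1, h2⟩ c
    by_cases hc : b = c
    · subst hc; simp [Nat.testBit_and, Nat.testBit_or, hsb, hvb, h2]
    · have := h1 c
      simpa [Nat.testBit_and, Nat.testBit_or, hsb, hc] using this

theorem pvTermMask_eq (sv : List String) (hnd : sv.Nodup) (i : Int) (t : List String)
    (hvars : ∀ lit ∈ t, pvVarOfB lit ∈ sv) (m v : Nat)
    (hinv : ∀ c, v.testBit c = true → m.testBit c = true) :
    ((i.toNat &&& m == v) && pvTermA sv (pvCaseA i sv.length) t) =
      (match pvTermMaskB (pvPosB sv) t m v with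
       | some mv => (i.toNat &&& mv.1 == mv.2)
       | none => false) := by
  induction t generalizing m v with
  | nil =>
    simp [pvTermA, pvTermMaskB]
  | cons lit rest ih =>
    obtain ⟨k, hk⟩ : ∃ k, PySem.List.index? sv (pvVarOfB lit) = some k :=
      Option.isSome_iff_exists.1 ((PySem.List.index?_isSome_iff _ _).2
        (hvars lit (List.mem_cons_self)))
    obtain ⟨hlt, -, -⟩ := PySem.List.getElem_of_index?_eq_some hk
    have hb : ((pvPosB sv).getD (pvVarOfB lit) 0).toNat = sv.length - 1 - k := by
      rw [pvPos_getD sv hnd _ k hk]; omega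
    simp only [pvTermA, pvTermMaskB, hb]
    rw [pvLit_eq sv i lit k hk]
    set b := sv.length - 1 - k with hbdef
    set want := !(PySem.Str.pyGet? lit (-1) == some '\'') with hwant
    by_cases hmb : m.testBit b = true
    · rw [if_pos hmb]
      cases hvw : (v.testBit b == want) with
      | false =>
        rw [if_neg (show ¬ ((false : Bool) = true) by decide)]
        by_cases hkm : i.toNat &&& m = v
        · have h5 := congrArg (fun x => x.testBit b) hkm
          simp only [Nat.testBit_and, hmb, Bool.and_true] at h5
          have h6 : ¬ (i.toNat.testBit b = want) := by
            intro h
            rw [← h5, h] at hvw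
            simp at hvw
          rw [if_neg (by simp [h6])]
          simp
        · simp [hkm]
      | true =>
        rw [if_pos (show (true : Bool) = true from rfl),
           ← ih (fun l hl => hvars l (List.mem_cons_of_mem _ hl)) m v hinv]
        by_cases hkm : i.toNat &&& m = v
        · have h5 := congrArg (fun x => x.testBit b) hkm
          simp only [Nat.testBit_and, hmb, Bool.and_true] at h5
          have h3 : i.toNat.testBit b = want := h5.trans (by simpa using hvw)
          rw [if_pos (by simp [h3])]
        · have hf : (i.toNat &&& m == v) = false := by simp [hkm]
          rw [hf, Bool.false_and, Bool.false_and]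
    · rw [if_neg hmb]
      have hmb' : m.testBit b = false := Bool.eq_false_iff.2 hmb
      have hinv' := pvInvStep m v b want hinv
      rw [← ih (fun l hl => hvars l (List.mem_cons_of_mem _ hl)) (m ||| 1 <<< b)
            (if want then v ||| 1 <<< b else v) hinv']
      have hstep := pvStep i.toNat m v b want hmb' hinv
      by_cases h1 : i.toNat &&& (m ||| 1 <<< b) = (if want then v ||| 1 <<< b else v)
      · obtain ⟨h2, h3⟩ := hstep.1 h1
        rw [if_pos (by simp [h3])]
        simp [h1, h2]
      · have h4 : ¬ (i.toNat &&& m = v ∧ i.toNat.testBit b = want) := fun h => h1 (hstep.2 h)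
        by_cases h2 : i.toNat &&& m = v
        · have h3 : ¬ (i.toNat.testBit b = want) := fun h => h4 ⟨h2, h⟩
          rw [if_neg (by simp [h3])]
          simp [h1, h2]
        · have e1 : (i.toNat &&& m == v) = false := by simp [h2]
          have e2 : (i.toNat &&& (m ||| 1 <<< b) ==
              if want then v ||| 1 <<< b else v) = false := by simp [h1]
          rw [e1, e2, Bool.false_and, Bool.false_and]

theorem pvFound_eq (sv : List String) (hnd : sv.Nodup) (i : Int) (sop : List (List String))
    (hvars : ∀ t ∈ sop, ∀ lit ∈ t, pvVarOfB lit ∈ sv) :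
    pvFoundA sv (pvCaseA i sv.length) sop =
      (pvMasksB (pvPosB sv) sop).any (fun mv => i.toNat &&& mv.1 == mv.2) := by
  induction sop with
  | nil => simp [pvFoundA, pvMasksB]
  | cons t ts ih =>
    have ht := pvTermMask_eq sv hnd i t (hvars t List.mem_cons_self) 0 0 (by simp)
    rw [show (i.toNat &&& 0 == 0) = true by simp, Bool.true_and] at ht
    have hts := ih (fun u hu => hvars u (List.mem_cons_of_mem _ hu))
    simp only [pvFoundA, pvMasksB]
    cases hcase : pvTermMaskB (pvPosB sv) t 0 0 with
    | none =>
      rw [hcase] at ht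
      have ht' : pvTermA sv (pvCaseA i sv.length) t = false := by simpa using ht
      rw [ht', if_neg (show ¬ ((false : Bool) = true) by decide)]
      exact hts
    | some mv =>
      rw [hcase] at ht
      have ht' : pvTermA sv (pvCaseA i sv.length) t = (i.toNat &&& mv.1 == mv.2) := by
        simpa using ht
      rw [ht']
      cases hm : (i.toNat &&& mv.1 == mv.2)
      · rw [if_neg (show ¬ ((false : Bool) = true) by decide)]
        simp only [List.any_cons, hm, Bool.false_or]
        exact hts
      · rw [if_pos (show (true : Bool) = true from rfl)]
        simp [List.any_cons, hm]

-- ===== VERDICT (by name: the statement is the Claim_ definition above) =====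
theorem convert_sop_equation_spec : Claim_equal_convert_sop_equation := by
  intro sop _ _
  unfold Spec_convert_sop_equation
  show convert_sop_equation sop = convert_sop_equation_alt sop
  simp only [convert_sop_equation, convert_sop_equation_alt, pvVars_eq]
  generalize hsv : PySem.List.sorted (pvVarsA sop) (fun x => x) false = sv
  have hnd : sv.Nodup := by
    rw [← hsv]
    exact (PySem.List.sorted_perm _ _ _).symm.nodup (pvVarsA_nodup sop)
  have hvars : ∀ t ∈ sop, ∀ lit ∈ t, pvVarOfB lit ∈ sv := by
    intro t ht lit hl
    rw [← hsv, PySem.List.mem_sorted]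
    exact pvMem_vars sop t ht lit hl
  refine congrArg₂ Prod.mk rfl (congrArg String.ofList ?_)
  rw [show (List.foldl
        (fun acc i =>
          acc ++ [if pvFoundA sv (pvCaseA i sv.length) sop = true then '1' else '0'])
        [] (PySem.List.pyRange 0 (2 ^ sv.length) 1)) =
      [] ++ (PySem.List.pyRange 0 (2 ^ sv.length) 1).map
        (fun i => if pvFoundA sv (pvCaseA i sv.length) sop = true then '1' else '0') from
    PySem.List.foldl_append_singleton_eq_map _ _ _, List.nil_append]
  exact List.map_congr_left fun i _ => by rw [pvFound_eq sv hnd i sop hvars]
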